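-- pv_equiv track=rewrite | github.com/bhupathiraju1998/python-intensive | allPossibleSubsets.py | all_unique_combinations
-- ===== SOURCE A (Python) =====
-- def all_unique_combinations(words):
--     words = sorted(set(words))
--     n = len(words)
--     all_combinations = {0:[[]]}
--     for i in range(n):
--         all_combinations[i+1] = []
--
--         for combination in all_combinations[i]:
--             for word in words:
--                 if(combination and word >combination[-1]) or len(combination) == 0:
--                     all_combinations[i+1].append(combination+[word])
--
--     all_combinations.pop(0)
--     return all_combinations
-- ===== SOURCE B (Python) =====
-- def all_unique_combinations(words):
--     ws = sorted(set(words))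
--
--     def comb(r, seq):
--         # all r-element sorted combinations of seq, in lexicographic order
--         if not seq:
--             return [[]] if r == 0 else []
--         if r == 0:
--             return [[]]
--         first, rest = seq[0], seq[1:]
--         return [[first] + c for c in comb(r - 1, rest)] + comb(r, rest)
--
--     return {r: comb(r, ws) for r in range(1, len(ws) + 1)}
-- ===== Notes on version B (the rewrite author's own statement) =====
-- stated objective: alternative
-- what changed: Replaces the bottom-up DP (a dict of layers where each size-i combination is extended by every larger word) with direct recursive generation of the r-element combinations of the sorted deduplicated words for each size r.
import Mathlib
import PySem

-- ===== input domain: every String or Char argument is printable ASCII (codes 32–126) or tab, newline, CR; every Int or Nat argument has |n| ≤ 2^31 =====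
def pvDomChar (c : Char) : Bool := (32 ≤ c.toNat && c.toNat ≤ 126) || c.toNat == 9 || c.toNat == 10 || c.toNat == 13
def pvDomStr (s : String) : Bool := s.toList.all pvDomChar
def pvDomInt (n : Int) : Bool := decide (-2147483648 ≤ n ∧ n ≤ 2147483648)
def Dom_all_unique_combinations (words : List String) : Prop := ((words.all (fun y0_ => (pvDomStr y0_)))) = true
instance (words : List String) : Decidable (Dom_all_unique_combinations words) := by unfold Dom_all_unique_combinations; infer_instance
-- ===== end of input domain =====

-- B replaces A's bottom-up DP over a dict of layers by direct recursive generation of the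
-- r-element combinations per size (same return value; objective: alternative algorithm).

-- ===== PORT A =====
-- `(combination and word > combination[-1]) or len(combination) == 0`
-- (combination[-1] is only reached when combination is nonempty, where it is List.getLastD)
def pvCondA (c : List String) (w : String) : Bool :=
  (!c.isEmpty && decide (c.getLastD "" < w)) || (c.length == 0)

-- body of `for i in range(n)`: set all_combinations[i+1] = [], then append every extension
def pvBodyA (ws : List String) (d : PySem.Dict Int (List (List String))) (i : Int) :
    PySem.Dict Int (List (List String)) :=
  let d1 := d.insert (i + 1) []                                       -- all_combinations[i+1] = []
  (d1.getD i []).foldl (fun d2 c =>                                   -- for combination in all_combinations[i]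
    ws.foldl (fun d3 w =>                                             -- for word in words
      if pvCondA c w then d3.modify (i + 1) [] (fun l => l ++ [c ++ [w]]) else d3) d2) d1

def all_unique_combinations (words : List String) : List (Int × List (List String)) :=
  let ws := PySem.List.sorted (PySem.Set.ofList words) (fun x => x)   -- words = sorted(set(words))
  let n : Int := (ws.length : Int)
  let d0 : PySem.Dict Int (List (List String)) :=
    PySem.Dict.ofList [((0 : Int), ([[]] : List (List String)))]      -- {0: [[]]}
  let d := (PySem.List.pyRange 0 n).foldl (pvBodyA ws) d0
  (d.erase 0).items                                                   -- all_combinations.pop(0); return dict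

-- ===== PORT B =====
-- Source B's comb(r, seq): all r-element combinations of seq, lexicographic
def pvComb (r : Nat) (seq : List String) : List (List String) :=
  match seq with
  | [] => if r = 0 then [[]] else []    -- if not seq: return [[]] if r == 0 else []
  | x :: rest =>
    match r with
    | 0 => [[]]                         -- if r == 0: return [[]]
    | r' + 1 => (pvComb r' rest).map (fun c => x :: c) ++ pvComb (r' + 1) rest

def all_unique_combinations_alt (words : List String) : List (Int × List (List String)) :=
  let ws := PySem.List.sorted (PySem.Set.ofList words) (fun x => x)
  (PySem.List.pyRange 1 ((ws.length : Int) + 1)).map (fun r => (r, pvComb r.toNat ws))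

-- ===== PRECONDITION & SPEC =====
def Spec_all_unique_combinations (words : List String) (out : List (Int × List (List String))) : Prop := out = all_unique_combinations_alt words
instance (words : List String) (out : List (Int × List (List String))) : Decidable (Spec_all_unique_combinations words out) := by unfold Spec_all_unique_combinations; infer_instance

-- ===== CLAIM (what is proved, stated in full; the proofs are below) =====
def Claim_equal_all_unique_combinations : Prop := ∀ (words : List String), Dom_all_unique_combinations words → Spec_all_unique_combinations words (all_unique_combinations words)

-- ===== LEMMAS AND PROOFS =====

-- the extension step A performs on one combination: all words beyond its last element, appended
def pvExt (ws : List String) (c : List String) : List (List String) :=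
  (ws.filter (fun w => pvCondA c w)).map (fun w => c ++ [w])

theorem pvComb_zero (seq : List String) : pvComb 0 seq = [[]] := by
  cases seq <;> rfl

theorem pvCondA_nil (w : String) : pvCondA [] w = true := by
  simp [pvCondA]

theorem pvCondA_ne_nil {c : List String} (h : c ≠ []) (w : String) :
    pvCondA c w = decide (c.getLastD "" < w) := by
  cases c with
  | nil => exact absurd rfl h
  | cons a l => simp [pvCondA]

theorem pvComb_sublist {r : Nat} {xs c : List String} (h : c ∈ pvComb r xs) : c.Sublist xs := by
  induction xs generalizing r c with
  | nil =>
    cases r with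
    | zero => simp [pvComb] at h; simp [h]
    | succ r => simp [pvComb] at h
  | cons x xs ih =>
    cases r with
    | zero => simp [pvComb] at h; simp [h]
    | succ r =>
      simp only [pvComb, List.mem_append, List.mem_map] at h
      rcases h with ⟨c', hc', rfl⟩ | h
      · exact (ih hc').cons₂ x
      · exact (ih h).cons x

theorem pvComb_ne_nil {r : Nat} {xs c : List String} (h : c ∈ pvComb (r + 1) xs) : c ≠ [] := by
  induction xs generalizing r with
  | nil => simp [pvComb] at h
  | cons x xs ih =>
    simp only [pvComb, List.mem_append, List.mem_map] at h
    rcases h with ⟨c', _, rfl⟩ | h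
    · simp
    · exact ih h

theorem pvComb_one (xs : List String) : pvComb 1 xs = xs.map (fun x => [x]) := by
  induction xs with
  | nil => rfl
  | cons x xs ih => simp [pvComb, ih, pvComb_zero]

-- last element of a nonempty combination drawn from xs lies in xs
theorem pvLast_mem {xs c : List String} (hs : c.Sublist xs) (hne : c ≠ []) :
    c.getLastD "" ∈ xs := by
  have : c.getLastD "" ∈ c := by
    cases c with
    | nil => exact absurd rfl hne
    | cons a l =>
      rw [List.getLastD_eq_getLast?, List.getLast?_eq_some_getLast (by simp : a :: l ≠ [])]
      exact List.getLast_mem _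
  exact hs.subset this

theorem pvExt_cons_of_mem {x : String} {xs c : List String}
    (hgt : ∀ y ∈ xs, x < y) (hs : c.Sublist xs) (hne : c ≠ []) :
    pvExt (x :: xs) c = pvExt xs c := by
  have hlast : c.getLastD "" ∈ xs := pvLast_mem hs hne
  have : pvCondA c x = false := by
    rw [pvCondA_ne_nil hne]
    simp only [decide_eq_false_iff_not]
    exact not_lt.2 (le_of_lt (hgt _ hlast))
  simp [pvExt, List.filter_cons, this]

theorem pvExt_cons_cons {x : String} {xs c' : List String}
    (hgt : ∀ y ∈ xs, x < y) (hs : c'.Sublist xs) :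
    pvExt (x :: xs) (x :: c') = (pvExt xs c').map (fun c => x :: c) := by
  have hne : (x :: c') ≠ [] := by simp
  have hx : pvCondA (x :: c') x = false := by
    rw [pvCondA_ne_nil hne]
    simp only [decide_eq_false_iff_not]
    cases c' with
    | nil => simp
    | cons a l =>
      have : (x :: a :: l).getLastD "" = (a :: l).getLastD "" := by
        simp [List.getLastD_eq_getLast?]
      rw [this]
      exact not_lt.2 (le_of_lt (hgt _ (pvLast_mem hs (by simp))))
  have hsame : ∀ w ∈ xs, pvCondA (x :: c') w = pvCondA c' w := by
    intro w hw
    cases c' with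
    | nil => simp [pvCondA_nil, pvCondA_ne_nil (by simp : ([x] : List String) ≠ []), hgt w hw]
    | cons a l =>
      rw [pvCondA_ne_nil (by simp), pvCondA_ne_nil (by simp)]
      simp [List.getLastD_eq_getLast?, List.getLast?_cons_cons]
  rw [pvExt, List.filter_cons, if_neg (by simp [hx]), List.filter_congr hsame]
  simp [pvExt, List.map_map, Function.comp]

-- KEY: one DP layer step of A equals the next size of B's combinations
theorem pvStep (ws : List String) (hsort : ws.Pairwise (· < ·)) (r : Nat) :
    (pvComb r ws).flatMap (pvExt ws) = pvComb (r + 1) ws := by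
  induction ws generalizing r with
  | nil =>
    cases r with
    | zero => simp [pvComb, pvExt]
    | succ r => simp [pvComb]
  | cons x xs ih =>
    have hgt : ∀ y ∈ xs, x < y := fun y hy => (List.pairwise_cons.1 hsort).1 y hy
    have hsort' : xs.Pairwise (· < ·) := (List.pairwise_cons.1 hsort).2
    cases r with
    | zero =>
      simp only [pvComb_zero, List.flatMap_cons, List.flatMap_nil, List.append_nil]
      rw [pvComb_one, pvExt]
      rw [List.filter_congr (fun w _ => pvCondA_nil w)]
      simp [pvComb_zero]
    | succ r =>
      simp only [pvComb, List.flatMap_append, List.flatMap_map]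
      have h1 : (pvComb r xs).flatMap (fun c' => pvExt (x :: xs) (x :: c'))
          = (pvComb (r + 1) xs).map (fun c => x :: c) := by
        rw [List.flatMap_congr (g := fun c' => (pvExt xs c').map (fun c => x :: c))]
        · rw [← ih hsort' r]
          simp [List.map_flatMap]
        · intro c' hc'
          exact pvExt_cons_cons hgt (pvComb_sublist hc')
      have h2 : (pvComb (r + 1) xs).flatMap (pvExt (x :: xs)) = pvComb (r + 2) xs := by
        rw [List.flatMap_congr (g := pvExt xs)]
        · exact ih hsort' (r + 1)
        · intro c hc
          exact pvExt_cons_of_mem hgt (pvComb_sublist hc) (pvComb_ne_nil hc)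
      rw [h1, h2]


-- the inner word loop, on a dict whose slot K was just written
theorem pvInnerLoop (ws : List String) (d : PySem.Dict Int (List (List String))) (K : Int)
    (c : List String) (v : List (List String)) :
    ws.foldl (fun d3 w => if pvCondA c w then d3.modify K [] (fun l => l ++ [c ++ [w]]) else d3)
      (d.insert K v) = d.insert K (v ++ pvExt ws c) := by
  induction ws generalizing v with
  | nil => simp [pvExt]
  | cons w ws ih =>
    by_cases h : pvCondA c w = true
    · simp only [List.foldl_cons, h, if_pos]
      rw [PySem.Dict.modify, PySem.Dict.getD_insert_self, PySem.Dict.insert_insert_self, ih]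
      simp [pvExt, h]
    · simp only [List.foldl_cons, if_neg h, ih]
      simp [pvExt, h]

-- the combination loop: appends all extensions to slot K
theorem pvOuterLoop (ws : List String) (d : PySem.Dict Int (List (List String))) (K : Int)
    (cs : List (List String)) (v : List (List String)) :
    cs.foldl (fun d2 c =>
        ws.foldl (fun d3 w => if pvCondA c w then d3.modify K [] (fun l => l ++ [c ++ [w]]) else d3) d2)
      (d.insert K v) = d.insert K (v ++ cs.flatMap (pvExt ws)) := by
  induction cs generalizing v with
  | nil => simp
  | cons c cs ih =>
    simp only [List.foldl_cons]
    rw [pvInnerLoop, ih]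
    simp

-- A's dict after i iterations of the outer loop
def pvLayers (ws : List String) (i : Nat) : PySem.Dict Int (List (List String)) :=
  PySem.Dict.mk ((List.range (i + 1)).map (fun k : Nat => ((k : Int), pvComb k ws)))

theorem pvLayers_keys_nodup (ws : List String) (i : Nat) : (pvLayers ws i).keys.Nodup := by
  have h : (pvLayers ws i).keys = (List.range (i + 1)).map (fun k : Nat => (k : Int)) := by
    simp [pvLayers, PySem.Dict.keys_mk, List.map_map, Function.comp]
  rw [h]
  exact List.nodup_range.map (fun a b hab => by exact_mod_cast hab)

theorem pvLayers_not_contains (ws : List String) (i : Nat) :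
    (pvLayers ws i).contains ((i : Int) + 1) = false := by
  simp only [pvLayers, PySem.Dict.contains_mk]
  rw [List.any_eq_false]
  intro p hp
  simp only [List.mem_map, List.mem_range] at hp
  obtain ⟨k, hk, rfl⟩ := hp
  simp only [beq_iff_eq]
  omega

theorem pvLayers_getD (ws : List String) (i : Nat) :
    (pvLayers ws i).getD (i : Int) [] = pvComb i ws := by
  apply PySem.Dict.getD_of_mem_items _ _ (pvLayers_keys_nodup ws i)
  simp only [pvLayers, List.mem_map]
  exact ⟨i, by simp⟩

theorem pvLayers_step (ws : List String) (i : Nat) :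
    (pvLayers ws i).insert ((i : Int) + 1) (pvComb (i + 1) ws) = pvLayers ws (i + 1) := by
  rw [PySem.Dict.insert, pvLayers_not_contains]
  simp only [Bool.false_eq_true, if_false]
  apply PySem.Dict.ext
  simp [pvLayers, List.range_succ]

theorem pvOuterStep (ws : List String) (hsort : ws.Pairwise (· < ·)) (i : Nat) :
    pvBodyA ws (pvLayers ws i) (i : Int) = pvLayers ws (i + 1) := by
  have hne : (i : Int) ≠ (i : Int) + 1 := by omega
  unfold pvBodyA
  simp only
  rw [PySem.Dict.getD_insert_of_ne _ _ _ hne, pvLayers_getD, pvOuterLoop]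
  rw [List.nil_append, pvStep ws hsort i, pvLayers_step ws i]

theorem pvFullLoop (ws : List String) (hsort : ws.Pairwise (· < ·)) (m : Nat) :
    (PySem.List.pyRange 0 (m : Int)).foldl (pvBodyA ws) (pvLayers ws 0) = pvLayers ws m := by
  induction m with
  | zero => rfl
  | succ m ih =>
    rw [show ((m + 1 : Nat) : Int) = (m : Int) + 1 by push_cast; ring,
      PySem.List.pyRange_one_succ_right (by positivity), List.foldl_append, ih,
      List.foldl_cons, List.foldl_nil]
    exact pvOuterStep ws hsort m

theorem pvErase_items (ws : List String) (n : Nat) :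
    ((pvLayers ws n).erase 0).items
      = (List.range n).map (fun k : Nat => (((k : Int) + 1), pvComb (k + 1) ws)) := by
  simp only [PySem.Dict.erase, pvLayers]
  rw [List.range_succ_eq_map, List.map_cons, List.filter_cons]
  rw [if_neg (by simp), List.map_map, List.filter_map]
  rw [List.filter_eq_self.2 (by
    intro k hk
    show (!((((k.succ : Nat) : Int), pvComb k.succ ws).1 == (0 : Int))) = true
    simp only [Bool.not_eq_eq_eq_not, Bool.not_true, beq_eq_false_iff_ne, ne_eq]
    push_cast
    omega)]
  apply List.map_congr_left
  intro k hk
  show (((k.succ : Nat) : Int), pvComb k.succ ws) = _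
  rw [Nat.succ_eq_add_one]
  push_cast
  rfl

theorem pvRange_one (n : Nat) :
    PySem.List.pyRange 1 ((n : Int) + 1) = (List.range n).map (fun k : Nat => ((k : Int) + 1)) := by
  induction n with
  | zero => rfl
  | succ n ih =>
    rw [show ((n + 1 : Nat) : Int) + 1 = ((n : Int) + 1) + 1 by push_cast; ring,
      PySem.List.pyRange_one_succ_right (by omega), ih, List.range_succ]
    simp

-- ===== VERDICT (by name: the statement is the Claim_ definition above) =====
theorem all_unique_combinations_spec : Claim_equal_all_unique_combinations := by
  intro words _
  unfold Spec_all_unique_combinations all_unique_combinations all_unique_combinations_alt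
  set ws := PySem.List.sorted (PySem.Set.ofList words) (fun x => x) with hws
  have hsort : ws.Pairwise (· < ·) := PySem.List.sorted_ofList_pairwise_lt words
  simp only
  have h0 : PySem.Dict.ofList [((0 : Int), ([[]] : List (List String)))] = pvLayers ws 0 := by
    apply PySem.Dict.ext
    simp [pvLayers, PySem.Dict.ofList, PySem.Dict.update, PySem.Dict.insert,
      PySem.Dict.empty, PySem.Dict.contains_mk, pvComb_zero]
  rw [h0, pvFullLoop ws hsort ws.length, pvErase_items ws ws.length, pvRange_one ws.length,
    List.map_map]
  apply List.map_congr_left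
  intro k hk
  simp only [Function.comp_apply]
  have ht : ((k : Int) + 1).toNat = k + 1 := by omega
  rw [ht]
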